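-- pv_equiv track=rewrite | github.com/saathvik13/Solve_Global_Warming-IceTracking | polar.py | airice_simple_func
-- ===== SOURCE A (Python) =====
-- def airice_simple_func(image, edge_strength):
--     max_edge_list = []
--     for col in range(0, len(edge_strength[0])):
--         col_pixels = [edge_strength[row][col] for row in range(0, len(edge_strength))]
--         for row, pixel in enumerate(col_pixels):
--             if pixel == max(col_pixels):
--                 max_edge_list.append(row)
--                 break
--     return max_edge_list
-- ===== SOURCE B (Python) =====
-- def airice_simple_func(image, edge_strength):
--     cols = len(edge_strength[0])
--     best_val = edge_strength[0][:cols]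
--     best_row = [0] * cols
--     for r, row in enumerate(edge_strength[1:], 1):
--         for c in range(cols):
--             if row[c] > best_val[c]:
--                 best_val[c] = row[c]
--                 best_row[c] = r
--     return best_row
-- ===== Notes on version B (the rewrite author's own statement) =====
-- stated objective: faster
-- what changed: Replaces A's column-by-column rebuild (building each column list and re-evaluating max(col_pixels) inside the inner scan) with a single row-major pass maintaining per-column running best value and best row, strict '>' preserving first-max ties.
import Mathlib
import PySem

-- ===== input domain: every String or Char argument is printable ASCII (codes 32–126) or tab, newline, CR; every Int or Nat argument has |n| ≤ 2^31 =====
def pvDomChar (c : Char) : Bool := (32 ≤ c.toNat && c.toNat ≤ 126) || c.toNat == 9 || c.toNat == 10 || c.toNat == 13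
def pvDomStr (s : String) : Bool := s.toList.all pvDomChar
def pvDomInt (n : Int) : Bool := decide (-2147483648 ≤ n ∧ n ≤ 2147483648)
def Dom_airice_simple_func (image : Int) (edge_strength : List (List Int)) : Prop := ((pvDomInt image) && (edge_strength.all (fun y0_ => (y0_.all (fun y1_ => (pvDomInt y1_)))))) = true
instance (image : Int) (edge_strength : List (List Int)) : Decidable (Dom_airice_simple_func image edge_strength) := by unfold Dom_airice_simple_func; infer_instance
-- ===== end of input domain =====

-- B replaces A's per-column rebuild-and-rescan (with max() recomputed in the inner loop)
-- by a single row-major pass keeping running best value / best row per column; objective: faster (constant factor).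

-- ===== PORT A =====
-- inner loop 'for row, pixel in enumerate(col_pixels): if pixel == max(col_pixels): <row>; break'
def aScan (m : Option Int) : List Int → Nat → Option Nat
  | [], _ => none
  | p :: rest, i => if some p = m then some i else aScan m rest (i + 1)

-- 'col_pixels = [edge_strength[row][col] for row in range(0, len(edge_strength))]'
def aColPixels (edge_strength : List (List Int)) (col : Nat) : List Int :=
  (List.range edge_strength.length).map
    (fun row => (edge_strength.getD row []).getD col 0)

def airice_simple_func (image : Int) (edge_strength : List (List Int)) : List Int :=
  (List.range (edge_strength.headD []).length).foldl
    (fun acc col =>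
      match aScan (PySem.List.max? (aColPixels edge_strength col) (fun y => y))
          (aColPixels edge_strength col) 0 with
      | some r => acc ++ [(r : Int)]
      | none => acc)
    []

-- ===== PORT B =====
-- one row of B's pass: the inner 'for c in range(cols)' updating best_val/best_row in place
def bStep (cols : Nat) (s : List Int × List Int) (r : Int) (row : List Int) :
    List Int × List Int :=
  let upd := (List.range cols).map (fun c =>
    if row.getD c 0 > s.1.getD c 0 then (row.getD c 0, r) else (s.1.getD c 0, s.2.getD c 0))
  (upd.map (·.1), upd.map (·.2))

def airice_simple_func_alt (image : Int) (edge_strength : List (List Int)) : List Int :=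
  let cols := (edge_strength.headD []).length
  let init : List Int × List Int :=
    ((edge_strength.headD []).take cols, List.replicate cols (0 : Int))
  ((PySem.List.enumerate (edge_strength.drop 1) 1).foldl
    (fun s p => bStep cols s p.1 p.2) init).2

-- ===== PRECONDITION & SPEC =====
-- Python A raises IndexError when edge_strength is empty (edge_strength[0]) or when some row is
-- shorter than the first row (edge_strength[row][col]); exactly those inputs are excluded.
def Pre_airice_simple_func (image : Int) (edge_strength : List (List Int)) : Prop :=
  edge_strength ≠ [] ∧ ∀ row ∈ edge_strength, (edge_strength.headD []).length ≤ row.length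
instance (image : Int) (edge_strength : List (List Int)) : Decidable (Pre_airice_simple_func image edge_strength) := by unfold Pre_airice_simple_func; infer_instance

def pvWitness_airice_simple_func : Int × List (List Int) := (0, [[1, 2], [3, 1]])

def Spec_airice_simple_func (image : Int) (edge_strength : List (List Int)) (out : List Int) : Prop := out = airice_simple_func_alt image edge_strength
instance (image : Int) (edge_strength : List (List Int)) (out : List Int) : Decidable (Spec_airice_simple_func image edge_strength out) := by unfold Spec_airice_simple_func; infer_instance

-- ===== CLAIM (what is proved, stated in full; the proofs are below) =====
def Claim_equal_airice_simple_func : Prop := ∀ (image : Int) (edge_strength : List (List Int)), Dom_airice_simple_func image edge_strength → Pre_airice_simple_func image edge_strength → Spec_airice_simple_func image edge_strength (airice_simple_func image edge_strength)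

-- ===== LEMMAS AND PROOFS =====

-- the per-column running-maximum fold (proof-only characterisation of B's column behaviour)
def colFold : List Int → Int × Int → Int → Int × Int
  | [], s, _ => s
  | x :: xs, s, r => colFold xs (if x > s.1 then (x, r) else s) (r + 1)

lemma map_range_getD {α β : Type} (g : α → β) (d : α) :
    ∀ (l : List α), (List.range l.length).map (fun i => g (l.getD i d)) = l.map g := by
  intro l
  induction l with
  | nil => simp
  | cons x t ih =>
    rw [List.length_cons, List.range_succ_eq_map, List.map_cons, List.map_map]
    simp only [List.getD_cons_zero]
    rw [List.map_cons]
    exact congrArg _ ih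

lemma getD_map_range {β : Type} (f : Nat → β) (d : β) (n c : Nat) (hc : c < n) :
    ((List.range n).map f).getD c d = f c := by
  rw [List.getD_eq_getElem?_getD, List.getElem?_map, List.getElem?_range hc]
  rfl

lemma colFold_append (bs : List Int) :
    ∀ (as : List Int) (s : Int × Int) (r : Int),
      colFold (as ++ bs) s r = colFold bs (colFold as s r) (r + as.length) := by
  intro as
  induction as with
  | nil => intro s r; simp [colFold]
  | cons x t ih =>
    intro s r
    simp only [List.cons_append, colFold, ih, List.length_cons]
    congr 1
    push_cast
    ring

lemma colFold_fst : ∀ (xs : List Int) (m j r : Int),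
    (colFold xs (m, j) r).1 = xs.foldl max m := by
  intro xs
  induction xs with
  | nil => intro m j r; rfl
  | cons x t ih =>
    intro m j r
    simp only [colFold, List.foldl_cons]
    by_cases h : x > m
    · rw [if_pos h, ih, max_eq_right h.le]
    · rw [if_neg h, ih, max_eq_left (not_lt.mp h)]

lemma aScan_append (m : Option Int) :
    ∀ (l1 l2 : List Int) (i : Nat),
      aScan m (l1 ++ l2) i =
        (match aScan m l1 i with
         | some n => some n
         | none => aScan m l2 (i + l1.length)) := by
  intro l1
  induction l1 with
  | nil => intro l2 i; simp [aScan]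
  | cons x t ih =>
    intro l2 i
    simp only [List.cons_append, aScan]
    by_cases h : some x = m
    · rw [if_pos h, if_pos h]
    · rw [if_neg h, if_neg h, ih]
      have he : i + 1 + t.length = i + (x :: t).length := by
        simp only [List.length_cons]; omega
      rw [he]

lemma aScan_none (m : Option Int) :
    ∀ (l : List Int) (i : Nat), (∀ p ∈ l, some p ≠ m) → aScan m l i = none := by
  intro l
  induction l with
  | nil => intro i _; rfl
  | cons x t ih =>
    intro i h
    simp only [aScan]
    rw [if_neg (h x (List.mem_cons_self))]
    exact ih _ (fun p hp => h p (List.mem_cons_of_mem _ hp))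

lemma key_col (x : Int) (xs : List Int) :
    ∃ n : Nat, aScan (some (xs.foldl max x)) (x :: xs) 0 = some n ∧
      (colFold xs (x, 0) 1).2 = (n : Int) := by
  induction xs using List.reverseRecOn with
  | nil => exact ⟨0, by simp [aScan], rfl⟩
  | append_singleton xs y ih =>
    obtain ⟨n, hscan, hfold⟩ := ih
    rw [List.foldl_append, List.foldl_cons, List.foldl_nil]
    rw [colFold_append]
    by_cases hy : xs.foldl max x < y
    · -- y is a new strict maximum: first occurrence is at index xs.length + 1
      rw [max_eq_right hy.le]
      refine ⟨xs.length + 1, ?_, ?_⟩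
      · have hcons : x :: (xs ++ [y]) = (x :: xs) ++ [y] := by simp
        rw [hcons, aScan_append]
        have hnone : aScan (some y) (x :: xs) 0 = none := by
          apply aScan_none
          intro p hp hpy
          have hmax : PySem.List.max? (x :: xs) (fun z => z) = some (xs.foldl max x) :=
            PySem.List.max?_id_cons x xs
          have := PySem.List.max?_isMax hmax p hp
          simp only [Option.some.injEq] at hpy
          omega
        rw [hnone]
        simp [aScan]
      · simp only [colFold, colFold_fst]
        rw [if_pos (show y > xs.foldl max x from hy)]
        push_cast
        ring
    · rw [max_eq_left (not_lt.mp hy)]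
      refine ⟨n, ?_, ?_⟩
      · have hcons : x :: (xs ++ [y]) = (x :: xs) ++ [y] := by simp
        rw [hcons, aScan_append, hscan]
      · simp only [colFold, colFold_fst]
        rw [if_neg (show ¬ y > xs.foldl max x from hy)]
        exact hfold

lemma flatMap_eq_map_of {α β : Type} (l : List α) (f : α → List β) (g : α → β)
    (h : ∀ c ∈ l, f c = [g c]) : l.flatMap f = l.map g := by
  induction l with
  | nil => rfl
  | cons x t ih =>
    rw [List.flatMap_cons, List.map_cons, h x (List.mem_cons_self),
      ih (fun c hc => h c (List.mem_cons_of_mem _ hc))]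
    rfl

lemma bfold (cols : Nat) :
    ∀ (rs : List (List Int)) (r : Int) (f g : Nat → Int),
      (PySem.List.enumerate rs r).foldl (fun s p => bStep cols s p.1 p.2)
        ((List.range cols).map f, (List.range cols).map g)
      = ((List.range cols).map (fun c => (colFold (rs.map (fun rw => rw.getD c 0)) (f c, g c) r).1),
         (List.range cols).map (fun c => (colFold (rs.map (fun rw => rw.getD c 0)) (f c, g c) r).2)) := by
  intro rs
  induction rs with
  | nil =>
    intro r f g
    simp [PySem.List.enumerate_nil, colFold]
  | cons rw rs ih =>
    intro r f g
    rw [PySem.List.enumerate_cons, List.foldl_cons]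
    have hstep :
        bStep cols ((List.range cols).map f, (List.range cols).map g) r rw
        = ((List.range cols).map (fun c => if rw.getD c 0 > f c then rw.getD c 0 else f c),
           (List.range cols).map (fun c => if rw.getD c 0 > f c then r else g c)) := by
      unfold bStep
      simp only [List.map_map, Prod.mk.injEq]
      constructor <;>
      · apply List.map_congr_left
        intro c hc
        have hc' : c < cols := List.mem_range.mp hc
        simp only [Function.comp, getD_map_range _ _ _ _ hc']
        split <;> rfl
    rw [hstep, ih (r + 1)]
    simp only [List.map_cons, Prod.mk.injEq]
    constructor <;>
    · apply List.map_congr_left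
      intro c _
      simp only [colFold]
      congr 1
      split <;> rfl

lemma replicate_eq_map_range (n : Nat) :
    List.replicate n (0 : Int) = (List.range n).map (fun _ => (0 : Int)) := by
  rw [List.map_const', List.length_range]

lemma self_eq_map_range (l : List Int) :
    l = (List.range l.length).map (fun c => l.getD c 0) := by
  have := map_range_getD (fun x : Int => x) 0 l
  simpa using this.symm

-- ===== VERDICT (by name: the statement is the Claim_ definition above) =====
theorem airice_simple_func_spec : Claim_equal_airice_simple_func := by
  intro image es _hdom _hpre
  unfold Spec_airice_simple_func
  cases es with
  | nil => rfl
  | cons h t =>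
    -- normal form of A
    unfold airice_simple_func
    have hcolpix : ∀ col : Nat, aColPixels (h :: t) col = (h :: t).map (fun rw => rw.getD col 0) := by
      intro col
      exact map_range_getD (fun rw : List Int => rw.getD col 0) [] (h :: t)
    have hbody : (fun (acc : List Int) (col : Nat) =>
        match aScan (PySem.List.max? (aColPixels (h :: t) col) (fun y => y))
            (aColPixels (h :: t) col) 0 with
        | some r => acc ++ [(r : Int)]
        | none => acc)
        = (fun (acc : List Int) (col : Nat) => acc ++
            (match aScan (PySem.List.max? (aColPixels (h :: t) col) (fun y => y))
                (aColPixels (h :: t) col) 0 with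
             | some r => [(r : Int)]
             | none => [])) := by
      funext acc col
      cases aScan (PySem.List.max? (aColPixels (h :: t) col) (fun y => y))
          (aColPixels (h :: t) col) 0 <;> simp
    rw [hbody, PySem.List.foldl_append_eq_flatMap, List.nil_append]
    rw [flatMap_eq_map_of _ _
      (fun c => (colFold (t.map (fun rw => rw.getD c 0)) (h.getD c 0, 0) 1).2)]
    · -- normal form of B
      unfold airice_simple_func_alt
      simp only [List.headD_cons, List.drop_one, List.tail_cons, List.take_length]
      conv_rhs =>
        rw [show ((h : List Int), List.replicate h.length (0 : Int)) =
          ((List.range h.length).map (fun c => h.getD c 0),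
           (List.range h.length).map (fun _ => (0 : Int))) from by
            rw [← replicate_eq_map_range]; exact congrArg (·, _) (self_eq_map_range h)]
      rw [bfold]
    · intro c _
      obtain ⟨n, hscan, hfold⟩ := key_col (h.getD c 0) (t.map (fun rw => rw.getD c 0))
      rw [hcolpix c, List.map_cons, PySem.List.max?_id_cons, hscan, hfold]
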